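-- pv_equiv track=rewrite | github.com/mrevsine/VecTorn | src/HMM_testing.py | kmerize
-- ===== SOURCE A (Python) =====
-- import itertools
--
-- def get_all_possible_kmers(k):
--   bases = ["A","C","G","T"]
--   kmers = [''.join(seq) for seq in itertools.product(bases, repeat=k)]
--   return kmers
--
-- def kmerize(seq, k, overlapping=False):
--   possible_kmers = get_all_possible_kmers(k)
--   kmer_encoding_table = {seq:i for i,seq in enumerate(possible_kmers)}
--   if overlapping:
--     encoding = [kmer_encoding_table[seq[i:i+k]] for i in range(0,len(seq)-k+1)]
--   else:
--     end_index = len(seq) - (len(seq) % k) # cap seq length at a multiple of k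
--     encoding = [kmer_encoding_table[seq[i:i+k]] for i in range(0,end_index, k)]
--   return encoding
-- ===== SOURCE B (Python) =====
-- def kmerize(seq, k, overlapping=False):
--   val = {"A": 0, "C": 1, "G": 2, "T": 3}
--   n = len(seq)
--   stop = n - k + 1 if overlapping else n - n % k
--   step = 1 if overlapping else k
--   encoding = []
--   for i in range(0, stop, step):
--     code = 0
--     for c in seq[i:i+k]:
--       code = code * 4 + val[c]
--     encoding.append(code)
--   return encoding
-- ===== Notes on version B (the rewrite author's own statement) =====
-- stated objective: faster
-- what changed: B drops A's 4^k-entry itertools.product table and dict, computing each window's index directly as a base-4 number (A=0,C=1,G=2,T=3) with one inner loop per window.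
import Mathlib
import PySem

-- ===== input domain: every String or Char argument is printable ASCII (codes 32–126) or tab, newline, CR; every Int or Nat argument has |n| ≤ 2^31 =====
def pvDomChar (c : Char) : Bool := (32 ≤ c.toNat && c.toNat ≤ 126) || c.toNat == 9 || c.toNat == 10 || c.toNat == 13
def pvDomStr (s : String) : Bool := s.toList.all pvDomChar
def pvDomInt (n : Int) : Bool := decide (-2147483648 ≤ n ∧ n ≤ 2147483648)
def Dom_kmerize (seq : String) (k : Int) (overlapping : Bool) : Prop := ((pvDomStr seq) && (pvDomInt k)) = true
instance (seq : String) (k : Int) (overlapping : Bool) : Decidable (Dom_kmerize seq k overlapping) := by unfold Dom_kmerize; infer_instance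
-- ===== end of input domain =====

-- B replaces A's 4^k-entry lookup table (itertools.product + dict) by computing each
-- window's base-4 code directly with one inner fold (objective: faster).

-- ===== PORT A =====
-- bases = ["A","C","G","T"] (kmers are kept as their character lists; PySem string ops are over code-point lists)
def pvBases : List Char := ['A', 'C', 'G', 'T']

-- itertools.product(bases, repeat=k): tuples in lexicographic order, first coordinate slowest
def pvProduct : Nat → List (List Char)
  | 0 => [[]]
  | n + 1 => pvBases.flatMap (fun b => (pvProduct n).map (fun t => b :: t))

def kmerize (seq : String) (k : Int) (overlapping : Bool) : List Int :=
  -- get_all_possible_kmers(k); product with repeat<0 raises ValueError (excluded by Pre_), [] is a junk value there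
  let possibleKmers : List (List Char) := if k < 0 then [] else pvProduct k.toNat
  -- kmer_encoding_table = {seq:i for i,seq in enumerate(possible_kmers)}: one pass over
  -- enumerate(possible_kmers) (= zipIdx); the keys are pairwise distinct, so the
  -- comprehension is the literal association list of (kmer, index) pairs
  let table : PySem.Dict (List Char) Int :=
    PySem.Dict.mk (possibleKmers.zipIdx.map (fun p => (p.1, (p.2 : Int))))
  let s : List Char := seq.toList
  let n : Int := s.length
  if overlapping then
    -- [table[seq[i:i+k]] for i in range(0, len(seq)-k+1)]; a KeyError (excluded by Pre_) gives the junk default 0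
    (PySem.List.pyRange 0 (n - k + 1) 1).map
      (fun i => table.getD (PySem.List.slice s (some i) (some (i + k))) 0)
  else
    -- end_index = len(seq) - (len(seq) % k); % by 0 raises ZeroDivisionError (excluded by Pre_)
    let endIndex : Int := n - PySem.Int.mod n k
    (PySem.List.pyRange 0 endIndex k).map
      (fun i => table.getD (PySem.List.slice s (some i) (some (i + k))) 0)

-- ===== PORT B =====
-- val = {"A":0, "C":1, "G":2, "T":3}
def pvVal : PySem.Dict Char Int := PySem.Dict.ofList [('A', 0), ('C', 1), ('G', 2), ('T', 3)]

def kmerize_alt (seq : String) (k : Int) (overlapping : Bool) : List Int :=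
  let s : List Char := seq.toList
  let n : Int := s.length
  let stop : Int := if overlapping then n - k + 1 else n - PySem.Int.mod n k
  let step : Int := if overlapping then 1 else k
  (PySem.List.pyRange 0 stop step).foldl
    (fun acc i =>
      acc ++ [(PySem.List.slice s (some i) (some (i + k))).foldl
                (fun code c => code * 4 + pvVal.getD c 0) 0])
    []

-- ===== PRECONDITION & SPEC =====
-- Pre_ admits exactly the inputs on which A returns: A raises ValueError for k < 0
-- (itertools.product repeat<0), ZeroDivisionError for k = 0 without overlapping, and KeyError
-- whenever some character actually looked up (the whole string when overlapping windows
-- exist, i.e. 1 ≤ k ≤ len; the prefix of length len - len%k otherwise) is outside "ACGT".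
def pvIsBase (c : Char) : Bool := c == 'A' || c == 'C' || c == 'G' || c == 'T'

def Pre_kmerize (seq : String) (k : Int) (overlapping : Bool) : Prop :=
  (overlapping = true →
    0 ≤ k ∧ (k = 0 ∨ (seq.toList.length : Int) < k ∨ seq.toList.all pvIsBase = true)) ∧
  (overlapping = false →
    0 < k ∧ (seq.toList.take (seq.toList.length - seq.toList.length % k.toNat)).all pvIsBase = true)

instance (seq : String) (k : Int) (overlapping : Bool) : Decidable (Pre_kmerize seq k overlapping) := by
  unfold Pre_kmerize; infer_instance

def pvWitness_kmerize : String × Int × Bool := ("AC", 1, false)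

def Spec_kmerize (seq : String) (k : Int) (overlapping : Bool) (out : List Int) : Prop :=
  out = kmerize_alt seq k overlapping
instance (seq : String) (k : Int) (overlapping : Bool) (out : List Int) : Decidable (Spec_kmerize seq k overlapping out) := by
  unfold Spec_kmerize; infer_instance

-- ===== CLAIM (what is proved, stated in full; the proofs are below) =====
def Claim_equal_kmerize : Prop := ∀ (seq : String) (k : Int) (overlapping : Bool), Dom_kmerize seq k overlapping → Pre_kmerize seq k overlapping → Spec_kmerize seq k overlapping (kmerize seq k overlapping)

-- ===== LEMMAS AND PROOFS =====

lemma pv_isBase_mem {c : Char} (h : pvIsBase c = true) : c ∈ pvBases := by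
  simp only [pvIsBase, Bool.or_eq_true, beq_iff_eq] at h
  rcases h with ((h | h) | h) | h <;> simp [pvBases, h]

lemma pv_all_mem {l : List Char} (h : l.all pvIsBase = true) : ∀ c ∈ l, c ∈ pvBases :=
  fun c hc => pv_isBase_mem (List.all_eq_true.1 h c hc)

-- digit value of a base character
def pvIdxC (c : Char) : Nat := if c = 'A' then 0 else if c = 'C' then 1 else if c = 'G' then 2 else 3

-- base-4 code of a kmer, structurally (head digit most significant)
def pvEncN : List Char → Nat
  | [] => 0
  | c :: t => pvIdxC c * 4 ^ t.length + pvEncN t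

lemma pvVal_getD (c : Char) (hc : c ∈ pvBases) : pvVal.getD c 0 = (pvIdxC c : Int) := by
  fin_cases hc <;> decide

-- B's inner fold computes the base-4 code
lemma pv_fold_enc (w : List Char) (hw : ∀ c ∈ w, c ∈ pvBases) (a : Int) :
    w.foldl (fun code c => code * 4 + pvVal.getD c 0) a = a * 4 ^ w.length + (pvEncN w : Int) := by
  induction w generalizing a with
  | nil => simp [pvEncN]
  | cons c t ih =>
    simp only [List.foldl_cons, pvEncN, List.length_cons]
    rw [pvVal_getD c (hw c (by simp)), ih (fun x hx => hw x (by simp [hx]))]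
    push_cast; ring

lemma pvProduct_length (k : Nat) : (pvProduct k).length = 4 ^ k := by
  induction k with
  | zero => rfl
  | succ n ih => simp [pvProduct, pvBases, ih]; ring

lemma pv_mem_product (k : Nat) (w : List Char) (hlen : w.length = k) (hw : ∀ c ∈ w, c ∈ pvBases) :
    w ∈ pvProduct k := by
  induction k generalizing w with
  | zero => simp_all [pvProduct, List.length_eq_zero_iff]
  | succ n ih =>
    match w, hlen with
    | c :: t, hlen =>
      simp only [pvProduct, List.mem_flatMap]
      exact ⟨c, hw c (by simp), List.mem_map.2 ⟨t, ih t (by simpa using hlen) (fun x hx => hw x (by simp [hx])), rfl⟩⟩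

lemma pv_index?_map_cons (b : Char) (l : List (List Char)) (t : List Char) :
    PySem.List.index? (l.map (fun u => b :: u)) (b :: t)
      = PySem.List.index? l t := by
  induction l with
  | nil => rfl
  | cons x xs ih =>
    by_cases hx : x = t
    · subst hx
      rw [List.map_cons, PySem.List.index?_cons_self, PySem.List.index?_cons_self]
    · rw [List.map_cons, PySem.List.index?_cons_of_ne _ (by simp [hx]),
        PySem.List.index?_cons_of_ne _ hx, ih]

lemma pv_not_mem_map_cons {b c : Char} (hbc : b ≠ c) (l : List (List Char)) (t : List Char) :
    (c :: t) ∉ l.map (fun u => b :: u) := by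
  simp only [List.mem_map, not_exists]
  rintro x ⟨-, h⟩
  exact hbc (by injection h)

lemma pv_index?_append_right {α : Type} [BEq α] [LawfulBEq α] {l1 : List α} (l2 : List α) {v : α}
    (h : v ∉ l1) :
    PySem.List.index? (l1 ++ l2) v = (PySem.List.index? l2 v).map (· + l1.length) := by
  induction l1 with
  | nil => simp
  | cons x xs ih =>
    rw [List.cons_append, PySem.List.index?_cons_of_ne _ (fun he : x = v => h (he ▸ List.mem_cons_self)),
      ih (fun hm => h (List.mem_cons_of_mem _ hm))]
    cases PySem.List.index? l2 v with
    | none => simp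
    | some j => simp; omega

-- position of a well-formed kmer in the product list is its base-4 code
lemma pv_index?_product (k : Nat) (w : List Char) (hlen : w.length = k)
    (hw : ∀ c ∈ w, c ∈ pvBases) :
    PySem.List.index? (pvProduct k) w = some (pvEncN w) := by
  induction k generalizing w with
  | zero =>
    match w, hlen with
    | [], _ => decide
  | succ n ih =>
    match w, hlen with
    | c :: t, hlen =>
      have hlt : t.length = n := by simpa using hlen
      have hwt : ∀ x ∈ t, x ∈ pvBases := fun x hx => hw x (by simp [hx])
      have hidx := ih t hlt hwt
      have hlenP := pvProduct_length n
      have hmem : t ∈ pvProduct n := pv_mem_product n t hlt hwt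
      have hc := hw c (by simp)
      simp only [pvProduct, pvBases, List.flatMap_cons, List.flatMap_nil, List.append_nil]
      fin_cases hc
      · rw [PySem.List.index?_append_of_mem _ (List.mem_map.2 ⟨t, hmem, rfl⟩),
          pv_index?_map_cons, hidx]
        simp [pvEncN, pvIdxC, hlt]
      · rw [pv_index?_append_right _ (pv_not_mem_map_cons (by decide) _ _),
          PySem.List.index?_append_of_mem _ (List.mem_map.2 ⟨t, hmem, rfl⟩),
          pv_index?_map_cons, hidx]
        simp [pvEncN, pvIdxC, hlt, hlenP]; ring
      · rw [pv_index?_append_right _ (pv_not_mem_map_cons (by decide) _ _),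
          pv_index?_append_right _ (pv_not_mem_map_cons (by decide) _ _),
          PySem.List.index?_append_of_mem _ (List.mem_map.2 ⟨t, hmem, rfl⟩),
          pv_index?_map_cons, hidx]
        simp [pvEncN, pvIdxC, hlt, hlenP]; ring
      · rw [pv_index?_append_right _ (pv_not_mem_map_cons (by decide) _ _),
          pv_index?_append_right _ (pv_not_mem_map_cons (by decide) _ _),
          pv_index?_append_right _ (pv_not_mem_map_cons (by decide) _ _),
          pv_index?_map_cons, hidx]
        simp [pvEncN, pvIdxC, hlt, hlenP]; ring

-- the enumerated table: lookup = position in the list, offset by the start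
lemma pv_table_get? (l : List (List Char)) :
    ∀ (s : Nat) (v : List Char),
    (PySem.Dict.mk ((l.zipIdx s).map (fun p => (p.1, (p.2 : Int))))).get? v
      = match PySem.List.index? l v with
        | some j => some ((s : Int) + (j : Int))
        | none => none := by
  induction l with
  | nil => intro s v; simp [PySem.Dict.get?]
  | cons x xs ih =>
    intro s v
    rw [List.zipIdx_cons, List.map_cons, PySem.Dict.get?_mk_cons]
    by_cases hv : x = v
    · subst hv
      rw [PySem.List.index?_cons_self]
      simp
    · rw [if_neg (by simpa using hv), ih (s + 1) v, PySem.List.index?_cons_of_ne _ hv]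
      cases h2 : PySem.List.index? xs v with
      | none => simp
      | some j => simp; ring

-- A's table lookup of a well-formed kmer is its base-4 code
lemma pv_lookup (m : Nat) (w : List Char) (hlen : w.length = m) (hw : ∀ c ∈ w, c ∈ pvBases) :
    (PySem.Dict.mk ((pvProduct m).zipIdx.map (fun p => (p.1, (p.2 : Int))))).getD w 0
      = (pvEncN w : Int) := by
  rw [PySem.Dict.getD_eq_get?_getD, pv_table_get?, pv_index?_product m w hlen hw]
  simp

lemma pv_foldl_append_map {α β : Type} (l : List α) (f : α → β) (init : List β) :
    l.foldl (fun acc i => acc ++ [f i]) init = init ++ l.map f := by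
  induction l generalizing init with
  | nil => simp
  | cons x xs ih => simp [ih]

-- one window: A's table lookup equals B's direct base-4 fold
lemma pv_window (s : List Char) (i k : Int) (hi : 0 ≤ i) (hk : 0 ≤ k)
    (hbound : i.toNat + k.toNat ≤ s.length)
    (hchars : ∀ c ∈ (s.drop i.toNat).take k.toNat, c ∈ pvBases) :
    (PySem.Dict.mk ((pvProduct k.toNat).zipIdx.map
        (fun p => (p.1, (p.2 : Int))))).getD (PySem.List.slice s (some i) (some (i + k))) 0
      = (PySem.List.slice s (some i) (some (i + k))).foldl
          (fun code c => code * 4 + pvVal.getD c 0) 0 := by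
  rw [PySem.List.slice_toNat s hi (by omega)]
  have htn : (i + k).toNat - i.toNat = k.toNat := by omega
  rw [htn]
  have hlen : ((s.drop i.toNat).take k.toNat).length = k.toNat := by
    simp [List.length_take, List.length_drop]; omega
  rw [pv_lookup k.toNat _ hlen hchars, pv_fold_enc _ hchars 0]
  simp

-- ===== VERDICT (by name: the statement is the Claim_ definition above) =====
theorem kmerize_spec : Claim_equal_kmerize := by
  intro seq k ov _ hpre
  obtain ⟨hT, hF⟩ := hpre
  unfold Spec_kmerize
  cases ov with
  | true =>
    obtain ⟨hk, hdisj⟩ := hT rfl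
    simp only [kmerize, kmerize_alt, if_neg (not_lt.2 hk), if_pos]
    rw [pv_foldl_append_map, List.nil_append]
    rcases hdisj with hk0 | hnk | hallb
    · subst hk0
      refine (List.map_congr_left (fun i hi => ?_)).symm
      have h0i : 0 ≤ i := (PySem.List.mem_pyRange_one.1 hi).1
      have hin : i < (seq.toList.length : Int) - 0 + 1 := (PySem.List.mem_pyRange_one.1 hi).2
      exact (pv_window seq.toList i 0 h0i le_rfl (by omega) (by simp)).symm
    · rw [PySem.List.pyRange_one_eq_nil (by omega)]
      simp
    · refine (List.map_congr_left (fun i hi => ?_)).symm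
      have h0i : 0 ≤ i := (PySem.List.mem_pyRange_one.1 hi).1
      have hin : i < (seq.toList.length : Int) - k + 1 := (PySem.List.mem_pyRange_one.1 hi).2
      exact (pv_window seq.toList i k h0i hk (by omega)
        (fun c hc => pv_all_mem hallb c (List.mem_of_mem_drop (List.mem_of_mem_take hc)))).symm
  | false =>
    obtain ⟨hk, hallb⟩ := hF rfl
    have hall := pv_all_mem hallb
    have hmod := PySem.Int.mod_eq_emod_of_pos (a := (seq.toList.length : Int)) hk
    simp only [kmerize, kmerize_alt, Bool.false_eq_true, if_neg (not_lt.2 (le_of_lt hk)),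
      ite_false, hmod]
    rw [pv_foldl_append_map, List.nil_append]
    refine (List.map_congr_left (fun i hi => ?_)).symm
    set N := seq.toList.length with hN
    set n : Int := (N : Int) with hn
    obtain ⟨h0i, hilt, hdvd⟩ := (PySem.List.mem_pyRange_iff_of_pos hk i).1 hi
    rw [Int.sub_zero] at hdvd
    have hmn : 0 ≤ n % k := Int.emod_nonneg n (ne_of_gt hk)
    have hmk : n % k < k := Int.emod_lt_of_pos n hk
    have hdvdE : k ∣ n - n % k := by
      refine ⟨n / k, ?_⟩
      have := Int.ediv_add_emod n k
      omega
    have hik : i + k ≤ n - n % k := by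
      have h1 : k ∣ n - n % k - i := dvd_sub hdvdE hdvd
      have h2 : 0 < n - n % k - i := by omega
      have := Int.le_of_dvd h2 h1
      omega
    have hcast : (n % k) = ((N % k.toNat : Nat) : Int) := by
      have hkc : k = (k.toNat : Int) := by omega
      rw [hkc, hn]
      exact (Int.natCast_mod N k.toNat).symm
    refine (pv_window seq.toList i k h0i (le_of_lt hk) (by omega) (fun c hc => ?_)).symm
    refine hall c ?_
    have h1 : (seq.toList.take (i.toNat + k.toNat)).drop i.toNat
        = (seq.toList.drop i.toNat).take k.toNat := by
      rw [List.drop_take]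
      congr 1
      omega
    have hc2 : c ∈ seq.toList.take (i.toNat + k.toNat) :=
      List.mem_of_mem_drop (by rw [h1]; exact hc)
    have hpref : (seq.toList.take (i.toNat + k.toNat)) <+: (seq.toList.take (N - N % k.toNat)) :=
      List.take_prefix_take_left (by omega)
    exact hpref.subset hc2
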